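-- pv_equiv track=rewrite | github.com/AttackandDefenceSecurityLab/AD_WebScanner | url_spider.py | turn_num
-- ===== SOURCE A (Python) =====
-- def turn_num(url, length):
--     '''
--     转化为特征向量
--     :param url: url
--     :param length: 域名和协议的长度，我们只需要后面的部分，前面的部分每个url都一样，节省计算
--     :return: url的特征向量
--     '''
--     url = url[length:]
--     dim = 75
--
--     char_index = [i for i in range(len(url)) if url[i] == '/']
--     char_index.insert(0, 0)
--
--     char_weight = []
--     for i in range(len(char_index)):
--         try:
--             char_weight.append(url[char_index[i]:char_index[i + 1]])
--         except:
--             char_weight.append(url[char_index[i]:])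
--
--     num = len(char_weight)
--
--     url_weight = [ord(j)*(num-i)*(num-i) for i in range(len(char_weight)) for j in char_weight[i]]
--
--     for i in range(len(url_weight), dim):
--         url_weight.append(0)
--     return url_weight
-- ===== SOURCE B (Python) =====
-- def turn_num(url, length):
--     s = url[length:]
--     num = s.count('/') + 1
--     out = []
--     seg = 0
--     for ch in s:
--         if ch == '/':
--             seg += 1
--         out.append(ord(ch) * (num - seg) * (num - seg))
--     out += [0] * (75 - len(out))
--     return out
-- ===== Notes on version B (the rewrite author's own statement) =====
-- stated objective: simpler
-- what changed: Replaced A's slash-index list, insert, slice-into-segments loop with try/except, and index-nested weighted comprehension by a single pass over the characters with a running segment counter (the '/' increments the counter before its own weight), then one padding append.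
import Mathlib
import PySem

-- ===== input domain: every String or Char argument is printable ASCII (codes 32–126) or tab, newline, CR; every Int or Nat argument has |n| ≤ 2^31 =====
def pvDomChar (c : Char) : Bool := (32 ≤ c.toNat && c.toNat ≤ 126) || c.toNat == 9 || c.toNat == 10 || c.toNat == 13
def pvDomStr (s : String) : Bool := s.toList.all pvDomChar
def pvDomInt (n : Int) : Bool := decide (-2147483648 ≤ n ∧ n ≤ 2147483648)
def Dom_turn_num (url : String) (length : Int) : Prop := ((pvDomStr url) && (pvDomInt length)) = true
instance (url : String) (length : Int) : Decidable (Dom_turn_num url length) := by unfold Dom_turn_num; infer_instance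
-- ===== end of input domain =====

-- B replaces A's slash-index list, slicing into segments and nested weighted comprehension by a
-- single pass with a running segment counter (objective: simpler; same return value everywhere).

-- ===== PORT A =====
-- A's segment loop 'for i in range(len(char_index)): try url[ci[i]:ci[i+1]] except: url[ci[i]:]'
-- iterated as a recursion over the index list: each step uses ci[i] and ci[i+1] when it exists
-- (the try succeeds), else slices to the end (the IndexError branch). Slice indices are Nat
-- (all of Python's are nonnegative here) and s[a:b] = (s.drop a).take (b-a): exact, since a ≤ len s
-- and Nat subtraction gives [] for b < a exactly as Python's slice does.
def buildSegs (s : List Char) : List Nat → List (List Char)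
  | [] => []
  | [a] => [s.drop a]
  | a :: b :: rest => ((s.drop a).take (b - a)) :: buildSegs s (b :: rest)

def turn_num (url : String) (length : Int) : List Int :=
  -- url = url[length:]
  let s : List Char := PySem.List.slice url.toList (some length) none
  -- char_index = [i for i in range(len(url)) if url[i] == '/']  (i in range, so getD is exact)
  let charIndex : List Nat := (List.range s.length).filter (fun i => s.getD i ' ' == '/')
  -- char_index.insert(0, 0)
  let ci : List Nat := 0 :: charIndex
  let cw : List (List Char) := buildSegs s ci
  let num : Nat := cw.length
  -- [ord(j)*(num-i)*(num-i) for i in range(len(cw)) for j in cw[i]]; i < num so Nat '-' is exact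
  let uw : List Int := (List.range cw.length).flatMap
    (fun i => (cw.getD i []).map (fun j => ((j.toNat * (num - i) * (num - i) : Nat) : Int)))
  -- for i in range(len(url_weight), dim): append 0   (75 - len iterations, clamped at 0)
  (List.range (75 - uw.length)).foldl (fun acc _ => acc ++ [0]) uw

-- ===== PORT B =====
-- one pass: seg counts the '/' seen so far (the '/' increments seg before its own weight)
def goB (num : Nat) : List Char → Nat → List Int
  | [], _ => []
  | c :: t, seg =>
    let seg' := if c == '/' then seg + 1 else seg
    ((c.toNat * (num - seg') * (num - seg') : Nat) : Int) :: goB num t seg'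

def turn_num_alt (url : String) (length : Int) : List Int :=
  let s : List Char := PySem.List.slice url.toList (some length) none
  let num : Nat := s.count '/' + 1
  let out : List Int := goB num s 0
  -- out += [0] * (75 - len(out))
  out ++ List.replicate (75 - out.length) 0

-- ===== PRECONDITION & SPEC =====
def Spec_turn_num (url : String) (length : Int) (out : List Int) : Prop := out = turn_num_alt url length
instance (url : String) (length : Int) (out : List Int) : Decidable (Spec_turn_num url length out) := by unfold Spec_turn_num; infer_instance

-- ===== CLAIM (what is proved, stated in full; the proofs are below) =====
def Claim_equal_turn_num : Prop := ∀ (url : String) (length : Int), Dom_turn_num url length → Spec_turn_num url length (turn_num url length)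

-- ===== LEMMAS AND PROOFS =====

-- indices of '/' in s (A's char_index)
def slashes (s : List Char) : List Nat := (List.range s.length).filter (fun i => s.getD i ' ' == '/')

def segsOf (s : List Char) : List (List Char) := buildSegs s (0 :: slashes s)

-- prepend a char to the first segment
def consHead (c : Char) : List (List Char) → List (List Char)
  | [] => [[c]]
  | x :: xs => (c :: x) :: xs

-- weight of a char in segment k out of num
def W (num k : Nat) (c : Char) : Int := ((c.toNat * (num - k) * (num - k) : Nat) : Int)

-- weighted flatten of segments, first segment index k
def wf (num : Nat) : Nat → List (List Char) → List Int
  | _, [] => []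
  | k, x :: xs => x.map (W num k) ++ wf num (k + 1) xs

lemma slashes_cons (c : Char) (t : List Char) :
    slashes (c :: t) = (if c == '/' then [0] else []) ++ (slashes t).map (· + 1) := by
  unfold slashes
  rw [List.length_cons, List.range_succ_eq_map, List.filter_cons, List.filter_map]
  by_cases h : c = '/' <;>
    simp [h, Function.comp_def, List.getElem?_cons_succ, Nat.succ_eq_add_one]

lemma buildSegs_map_succ (ci : List Nat) (c : Char) (t : List Char) :
    buildSegs (c :: t) (ci.map (· + 1)) = buildSegs t ci := by
  induction ci with
  | nil => rfl
  | cons a rest ih =>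
    cases rest with
    | nil => simp [buildSegs]
    | cons b r =>
      simp only [List.map_cons] at ih ⊢
      simp [buildSegs, ih, Nat.succ_sub_succ]

lemma segs_ne_nil (s : List Char) : segsOf s ≠ [] := by
  unfold segsOf
  cases h : slashes s <;> simp [buildSegs]

lemma segs_nil : segsOf [] = [[]] := rfl

lemma segs_cons (c : Char) (t : List Char) :
    segsOf (c :: t) = if c == '/' then [] :: consHead '/' (segsOf t) else consHead c (segsOf t) := by
  unfold segsOf
  rw [slashes_cons]
  by_cases h : c = '/'
  · subst h
    cases hp : slashes t with
    | nil => simp [buildSegs, consHead]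
    | cons p0 p' =>
      simp only [beq_self_eq_true, if_true, List.map_cons, List.singleton_append]
      show buildSegs _ (0 :: 0 :: _) = _
      have hb := buildSegs_map_succ (p0 :: p') '/' t
      simp only [List.map_cons] at hb
      simp [buildSegs, hb, consHead]
  · have hbe : (c == '/') = false := by simp [h]
    cases hp : slashes t with
    | nil => simp [hbe, buildSegs, consHead]
    | cons p0 p' =>
      simp only [hbe, List.map_cons]
      have hb := buildSegs_map_succ (p0 :: p') c t
      simp only [List.map_cons] at hb
      simp [buildSegs, hb, consHead]

lemma wf_segs (t : List Char) (num : Nat) : ∀ k, wf num k (segsOf t) = goB num t k := by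
  induction t with
  | nil => intro k; simp [segs_nil, wf, goB]
  | cons c t ih =>
    intro k
    rw [segs_cons]
    obtain ⟨x, xs, hx⟩ : ∃ x xs, segsOf t = x :: xs := by
      cases h : segsOf t with
      | nil => exact absurd h (segs_ne_nil t)
      | cons x xs => exact ⟨x, xs, rfl⟩
    have htail : ∀ m, List.map (W num m) x ++ wf num (m + 1) xs = goB num t m := by
      intro m
      have h2 := ih m
      rw [hx] at h2
      simpa only [wf] using h2
    by_cases h : c = '/'
    · subst h
      rw [if_pos (by simp), hx]
      simp only [consHead, wf, goB, List.map_nil, List.nil_append, List.map_cons,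
        List.cons_append, beq_self_eq_true, if_true]
      rw [htail (k + 1)]
      rfl
    · rw [if_neg (by simp [h]), hx]
      simp only [consHead, wf, goB, List.map_cons, List.cons_append,
        show (c == '/') = false by simp [h]]
      rw [htail k]
      rfl

lemma segs_length (s : List Char) : (segsOf s).length = s.count '/' + 1 := by
  induction s with
  | nil => rfl
  | cons c t ih =>
    rw [segs_cons]
    obtain ⟨x, xs, hx⟩ : ∃ x xs, segsOf t = x :: xs := by
      cases h : segsOf t with
      | nil => exact absurd h (segs_ne_nil t)
      | cons x xs => exact ⟨x, xs, rfl⟩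
    rw [hx] at ih
    simp only [List.length_cons] at ih
    by_cases h : c = '/'
    · subst h
      rw [if_pos (by simp), hx]
      simp only [consHead, List.length_cons]
      simp
      omega
    · rw [if_neg (by simp [h]), hx]
      simp only [consHead, List.length_cons]
      simp [h]
      omega

lemma flatMap_range_getD (l : List (List Char)) (num : Nat) :
    ∀ k, (List.range l.length).flatMap
      (fun i => (l.getD i []).map (fun j => W num (k + i) j)) = wf num k l := by
  induction l with
  | nil => intro k; simp [wf]
  | cons x xs ih =>
    intro k
    rw [List.length_cons, List.range_succ_eq_map, List.flatMap_cons, List.flatMap_map]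
    have he : (fun i => (((x :: xs).getD (Nat.succ i) []).map (fun j => W num (k + Nat.succ i) j)))
            = (fun i => ((xs.getD i []).map (fun j => W num ((k + 1) + i) j))) := by
      funext i
      rw [List.getD_cons_succ, show k + Nat.succ i = k + 1 + i from by omega]
    rw [he, ih (k + 1)]
    simp [wf]

theorem turn_num_core (s : List Char) :
    (List.range (segsOf s).length).flatMap
      (fun i => ((segsOf s).getD i []).map
        (fun j => ((j.toNat * ((segsOf s).length - i) * ((segsOf s).length - i) : Nat) : Int)))
    = goB (s.count '/' + 1) s 0 := by
  have h := flatMap_range_getD (segsOf s) (segsOf s).length 0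
  rw [wf_segs] at h
  rw [segs_length] at h ⊢
  rw [← h]
  simp [W]

-- ===== VERDICT (by name: the statement is the Claim_ definition above) =====
theorem turn_num_spec : Claim_equal_turn_num := by
  intro url length _
  unfold Spec_turn_num turn_num turn_num_alt
  dsimp only
  rw [PySem.List.foldl_append_singleton_eq_map (fun _ => (0 : Int))]
  rw [List.map_const', List.length_range]
  rw [show (0 :: (List.range (PySem.List.slice url.toList (some length) none).length).filter
        (fun i => (PySem.List.slice url.toList (some length) none).getD i ' ' == '/'))
      = 0 :: slashes (PySem.List.slice url.toList (some length) none) from rfl]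
  rw [show buildSegs (PySem.List.slice url.toList (some length) none)
        (0 :: slashes (PySem.List.slice url.toList (some length) none))
      = segsOf (PySem.List.slice url.toList (some length) none) from rfl]
  rw [turn_num_core]
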